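-- pv_equiv track=rewrite | github.com/rpp0/gr-lora | python/lora_decoder.py | deinterleave
-- ===== SOURCE A (Python) =====
-- def deinterleave(words, ppm):
--     bits_per_word = len(words)
--
--     result = []
--
--     offset_start = 0
--     for i in range(0, ppm):
--         d = ""
--         offset_diag = offset_start
--         for j in range(0, bits_per_word):
--             d += words[j][offset_diag]
--             offset_diag = (offset_diag + 1) % ppm
--         offset_start += 1
--         result.append(d)
--
--     return result
-- ===== SOURCE B (Python) =====
-- def deinterleave(words, ppm):
--     # Rotate-then-transpose: left-rotate each word's first ppm chars by its
--     # index (slicing, no per-character modular indexing), then distribute the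
--     # rotated word column-wise, instead of walking diagonals output-by-output.
--     if ppm <= 0:
--         return []
--     result = [''] * ppm
--     for j, w in enumerate(words):
--         k = j % ppm
--         rot = w[k:ppm] + w[:k]
--         for i, c in enumerate(rot):
--             result[i] += c
--     return result
-- ===== Notes on version B (the rewrite author's own statement) =====
-- stated objective: alternative
-- what changed: B left-rotates each word's first ppm characters by its index using slicing (rot = w[j%ppm:ppm] + w[:j%ppm]) and then transposes, appending the rotated word column-wise into the ppm output rows, instead of A's per-output diagonal walk with a running modular character index.
import Mathlib
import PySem

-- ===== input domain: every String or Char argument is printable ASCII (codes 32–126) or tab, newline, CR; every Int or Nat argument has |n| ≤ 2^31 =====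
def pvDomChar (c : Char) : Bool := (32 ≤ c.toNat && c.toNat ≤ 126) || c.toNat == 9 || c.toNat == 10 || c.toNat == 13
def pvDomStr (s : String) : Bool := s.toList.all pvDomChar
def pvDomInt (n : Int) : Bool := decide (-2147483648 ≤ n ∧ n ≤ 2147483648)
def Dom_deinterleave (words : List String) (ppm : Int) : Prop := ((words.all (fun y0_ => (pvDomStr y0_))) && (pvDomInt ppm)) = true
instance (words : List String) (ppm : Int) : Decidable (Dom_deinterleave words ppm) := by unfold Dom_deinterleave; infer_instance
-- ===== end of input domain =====

-- B re-implements the diagonal deinterleave by left-rotating each word's first ppm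
-- characters (slicing) and transposing column-wise; objective: alternative decomposition, same cost.

-- ===== PORT A =====
-- gather: for i in range(ppm), walk the diagonal collecting words[j][offset_diag], offset_diag stepping mod ppm
def deinterleave (words : List String) (ppm : Int) : List String :=
  let bits_per_word : Int := (words.length : Int)
  let st :=
    (PySem.List.pyRange 0 ppm 1).foldl
      (fun (st : List String × Int) _i =>
        let inner :=
          (PySem.List.pyRange 0 bits_per_word 1).foldl
            (fun (st2 : List Char × Int) j =>
              (st2.1 ++ [((PySem.Str.pyGet? (PySem.List.pyGetD words j "") st2.2).getD ' ')],
               PySem.Int.mod (st2.2 + 1) ppm))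
            ([], st.2)
        (st.1 ++ [String.ofList inner.1], st.2 + 1))
      ([], 0)
  st.1

-- ===== PORT B =====
-- rotate-then-transpose: rot = w[k:ppm] + w[:k] with k = j % ppm, then result[i] += rot[i]
-- (rows kept as List Char; Python's '' join-free string growth = appending one char, ofList at the end)
def deinterleave_alt (words : List String) (ppm : Int) : List String :=
  if ppm ≤ 0 then []
  else
    let result0 : List (List Char) := List.replicate ppm.toNat []
    let result :=
      (PySem.List.enumerate words).foldl
        (fun (res : List (List Char)) jw =>
          let w := jw.2.toList
          let k := PySem.Int.mod jw.1 ppm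
          let rot := PySem.List.slice w (some k) (some ppm) ++ PySem.List.slice w none (some k)
          (PySem.List.enumerate rot).foldl
            (fun (res : List (List Char)) ic =>
              PySem.List.pySetD res ic.1 (PySem.List.pyGetD res ic.1 [] ++ [ic.2]))
            res)
        result0
    result.map String.ofList

-- ===== PRECONDITION & SPEC =====
-- Pre_ excludes exactly the inputs where Python A raises IndexError (ppm > 0 and some
-- word shorter than ppm characters).
def Pre_deinterleave (words : List String) (ppm : Int) : Prop :=
  ppm ≤ 0 ∨ ∀ w ∈ words, ppm ≤ (w.toList.length : Int)
instance (words : List String) (ppm : Int) : Decidable (Pre_deinterleave words ppm) := by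
  unfold Pre_deinterleave; infer_instance
def pvWitness_deinterleave : List String × Int := (["ab", "cd"], 2)

def Spec_deinterleave (words : List String) (ppm : Int) (out : List String) : Prop := out = deinterleave_alt words ppm
instance (words : List String) (ppm : Int) (out : List String) : Decidable (Spec_deinterleave words ppm out) := by unfold Spec_deinterleave; infer_instance

-- ===== CLAIM (what is proved, stated in full; the proofs are below) =====
def Claim_equal_deinterleave : Prop := ∀ (words : List String) (ppm : Int), Dom_deinterleave words ppm → Pre_deinterleave words ppm → Spec_deinterleave words ppm (deinterleave words ppm)

-- ===== LEMMAS AND PROOFS =====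

-- the character both programs put at row i, column j (m = ppm.toNat)
def cellD (words : List String) (m i j : Nat) : Char :=
  ((words.getD j "").toList).getD ((i + j) % m) ' '

-- ===== A side =====

-- ((a % m) + 1) % m = (a + 1) % m, in the Int form the A port produces
lemma modStep (m : Nat) (hm : 0 < m) (a : Nat) :
    PySem.Int.mod (((a % m : Nat) : Int) + 1) ((m : Nat) : Int) = (((a + 1) % m : Nat) : Int) := by
  rw [PySem.Int.mod_eq_emod_of_pos (by exact_mod_cast hm)]
  push_cast
  rw [Int.emod_add_emod]

lemma innerA (words : List String) (m : Nat) (hm : 0 < m)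
    (i : Nat) (hi : i < m) (jend : Nat) :
    ((List.range jend).map (fun (k : Nat) => (k : Int))).foldl
      (fun (st2 : List Char × Int) j =>
        (st2.1 ++ [((PySem.Str.pyGet? (PySem.List.pyGetD words j "") st2.2).getD ' ')],
         PySem.Int.mod (st2.2 + 1) ((m : Nat) : Int)))
      ([], (i : Int))
    = ((List.range jend).map (cellD words m i),
       (((i + jend) % m : Nat) : Int)) := by
  induction jend with
  | zero => simp [Nat.mod_eq_of_lt hi]
  | succ j ih =>
    rw [List.range_succ, List.map_append, List.foldl_append, ih]
    simp only [List.map_cons, List.map_nil, List.foldl_cons, List.foldl_nil]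
    refine Prod.ext ?_ ?_
    · simp only [List.map_append, List.map_cons, List.map_nil]
      congr 1
      simp only [cellD, PySem.List.pyGetD_natCast, PySem.Str.pyGet?_natCast,
        List.getD_eq_getElem?_getD]
    · simp only []
      rw [modStep m hm (i + j)]
      rw [Nat.add_assoc]

lemma outerA (words : List String) (m : Nat) (hm : 0 < m) (kend : Nat) (hk : kend ≤ m) :
    ((List.range kend).map (fun (k : Nat) => (k : Int))).foldl
      (fun (st : List String × Int) _i =>
        let inner :=
          (PySem.List.pyRange 0 ((words.length : Nat) : Int) 1).foldl
            (fun (st2 : List Char × Int) j =>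
              (st2.1 ++ [((PySem.Str.pyGet? (PySem.List.pyGetD words j "") st2.2).getD ' ')],
               PySem.Int.mod (st2.2 + 1) ((m : Nat) : Int)))
            ([], st.2)
        (st.1 ++ [String.ofList inner.1], st.2 + 1))
      ([], 0)
    = ((List.range kend).map (fun i =>
         String.ofList ((List.range words.length).map (cellD words m i))),
       (kend : Int)) := by
  induction kend with
  | zero => simp
  | succ k ih =>
    rw [List.range_succ, List.map_append, List.foldl_append, ih (by omega)]
    simp only [List.map_cons, List.map_nil, List.foldl_cons, List.foldl_nil]
    rw [PySem.List.pyRange_zero_natCast, innerA words m hm k (by omega)]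
    refine Prod.ext ?_ ?_
    · simp only [List.map_append, List.map_cons, List.map_nil]
    · push_cast; ring

-- A's value, for ppm = m > 0
lemma A_eq (words : List String) (m : Nat) (hm : 0 < m) :
    deinterleave words ((m : Nat) : Int)
    = (List.range m).map (fun i =>
        String.ofList ((List.range words.length).map (cellD words m i))) := by
  show ((PySem.List.pyRange 0 ((m : Nat) : Int) 1).foldl _ ([], 0)).1 = _
  rw [PySem.List.pyRange_zero_natCast m, outerA words m hm m le_rfl]

-- ppm ≤ 0: A returns []
lemma A_nil (words : List String) (ppm : Int) (hm : ppm ≤ 0) :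
    deinterleave words ppm = [] := by
  show ((PySem.List.pyRange 0 ppm 1).foldl _ ([], 0)).1 = _
  rw [PySem.List.pyRange_one_eq_nil hm]
  rfl

-- ===== B side =====

-- enumerate as a map over range (column index / character index with its value)
lemma enum_getD {α : Type} (xs : List α) (d : α) :
    PySem.List.enumerate xs
    = (List.range xs.length).map (fun (j : Nat) => ((j : Int), xs.getD j d)) := by
  rw [PySem.List.enumerate_eq_map_pyRange xs d]
  show List.map _ (PySem.List.pyRange 0 ((xs.length : Nat) : Int) 1) = _
  rw [PySem.List.pyRange_zero_natCast, List.map_map]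
  exact List.map_congr_left (fun j _ => by
    simp [PySem.List.pyGetD_natCast])

-- the rotated word is exactly row-i readout cellD at every position i < m
lemma rot_eq (words : List String) (m j : Nat) (hm : 0 < m)
    (hlen : m ≤ (words.getD j "").toList.length) :
    PySem.List.slice (words.getD j "").toList (some ((j % m : Nat) : Int)) (some ((m : Nat) : Int))
      ++ PySem.List.slice (words.getD j "").toList none (some ((j % m : Nat) : Int))
    = (List.range m).map (fun i => cellD words m i j) := by
  set w := (words.getD j "").toList with hw
  set k := j % m with hk
  have hkm : k < m := Nat.mod_lt _ hm
  rw [PySem.List.slice_natCast, PySem.List.slice_to_natCast]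
  have hlen1 : (List.take (m - k) (List.drop k w)).length = m - k := by
    simp [List.length_take, List.length_drop]; omega
  have hlen2 : (List.take k w).length = k := by
    simp [List.length_take]; omega
  apply List.ext_getElem
  · simp [List.length_take, List.length_drop]; omega
  · intro i hi1 hi2
    have him : i < m := by simpa using hi2
    have hjk : (i + j) % m = (i + k) % m := by
      rw [Nat.add_mod i j m, ← hk, Nat.add_mod i k m, Nat.mod_eq_of_lt hkm]
    rw [List.getElem_map, List.getElem_range]
    unfold cellD
    rw [← hw, hjk]
    by_cases hcase : i < m - k
    · have hik : (i + k) % m = k + i := by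
        rw [Nat.mod_eq_of_lt (by omega), Nat.add_comm]
      rw [hik, List.getElem_append_left (by omega), List.getElem_take, List.getElem_drop,
        List.getD_eq_getElem w ' ' (by omega)]
    · have hik : (i + k) % m = i - (m - k) := by
        rw [Nat.mod_eq_sub_mod (by omega), Nat.mod_eq_of_lt (by omega)]
        omega
      rw [hik, List.getElem_append_right (by rw [hlen1]; omega),
        List.getElem_take, List.getD_eq_getElem w ' ' (by omega)]
      congr 1
      rw [hlen1]

-- inner loop: distributing a range-indexed list column-wise into range-indexed rows
lemma innerB (g : Nat → Char) (f : Nat → List Char) (m pend : Nat) (hp : pend ≤ m) :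
    ((List.range pend).map (fun (i : Nat) => ((i : Int), g i))).foldl
      (fun (res : List (List Char)) ic =>
        PySem.List.pySetD res ic.1 (PySem.List.pyGetD res ic.1 [] ++ [ic.2]))
      ((List.range m).map f)
    = (List.range m).map (fun i => if i < pend then f i ++ [g i] else f i) := by
  induction pend with
  | zero => simp
  | succ p ih =>
    rw [List.range_succ, List.map_append, List.foldl_append, ih (by omega)]
    simp only [List.map_cons, List.map_nil, List.foldl_cons, List.foldl_nil]
    rw [PySem.List.pySetD_natCast, PySem.List.pyGetD_natCast,
      PySem.List.getD_map_range _ _ _ _ (by omega)]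
    rw [if_neg (by omega)]
    apply List.ext_getElem
    · simp
    · intro t ht1 ht2
      rw [List.getElem_set]
      have htm : t < m := by simpa using ht2
      simp only [List.getElem_map, List.getElem_range]
      by_cases hpt : p = t
      · subst hpt
        rw [if_pos rfl, if_pos (by omega)]
      · rw [if_neg hpt]
        by_cases hc : t < p
        · rw [if_pos hc, if_pos (by omega)]
        · rw [if_neg hc, if_neg (by omega)]

-- outer loop state: after the first jend words, row i holds its first jend cells
lemma outerB (words : List String) (m : Nat) (hm : 0 < m)
    (hlen : ∀ w ∈ words, m ≤ w.toList.length)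
    (jend : Nat) (hj : jend ≤ words.length) :
    ((List.range jend).map (fun (j : Nat) => ((j : Int), words.getD j ""))).foldl
      (fun (res : List (List Char)) jw =>
        let w := jw.2.toList
        let k := PySem.Int.mod jw.1 ((m : Nat) : Int)
        let rot := PySem.List.slice w (some k) (some ((m : Nat) : Int))
          ++ PySem.List.slice w none (some k)
        (PySem.List.enumerate rot).foldl
          (fun (res : List (List Char)) ic =>
            PySem.List.pySetD res ic.1 (PySem.List.pyGetD res ic.1 [] ++ [ic.2]))
          res)
      ((List.range m).map (fun _ => ([] : List Char)))
    = (List.range m).map (fun i => (List.range jend).map (fun j => cellD words m i j)) := by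
  induction jend with
  | zero => simp
  | succ j ih =>
    rw [List.range_succ, List.map_append, List.foldl_append, ih (by omega)]
    simp only [List.map_cons, List.map_nil, List.foldl_cons, List.foldl_nil]
    have hmem : words.getD j "" ∈ words := by
      have hjl : j < words.length := by omega
      rw [List.getD_eq_getElem?_getD, List.getElem?_eq_getElem hjl]
      exact List.getElem_mem hjl
    have hwlen : m ≤ (words.getD j "").toList.length := hlen _ hmem
    show ((PySem.List.enumerate _).foldl _ _) = _
    rw [show PySem.Int.mod ((j : Nat) : Int) ((m : Nat) : Int) = ((j % m : Nat) : Int) from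
      PySem.Int.mod_natCast j m]
    rw [rot_eq words m j hm hwlen]
    rw [enum_getD _ ' ']
    rw [List.length_map, List.length_range]
    have hrep : (List.range m).map (fun (i : Nat) => ((i : Int), ((List.range m).map (fun t => cellD words m t j)).getD i ' '))
        = (List.range m).map (fun (i : Nat) => ((i : Int), cellD words m i j)) := by
      refine List.map_congr_left (fun i hi => ?_)
      rw [PySem.List.getD_map_range _ _ _ _ (List.mem_range.mp hi)]
    rw [hrep, innerB (fun i => cellD words m i j) _ m m le_rfl]
    refine List.map_congr_left (fun i hi => ?_)
    rw [if_pos (List.mem_range.mp hi), List.map_append]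
    rfl

-- B's value, for ppm = m > 0
lemma B_eq (words : List String) (m : Nat) (hm : 0 < m)
    (hlen : ∀ w ∈ words, m ≤ w.toList.length) :
    deinterleave_alt words ((m : Nat) : Int)
    = (List.range m).map (fun i =>
        String.ofList ((List.range words.length).map (cellD words m i))) := by
  unfold deinterleave_alt
  rw [if_neg (by omega)]
  simp only [Int.toNat_natCast]
  have h0 : List.replicate m ([] : List Char) = (List.range m).map (fun _ => ([] : List Char)) := by
    simp [List.map_const']
  rw [enum_getD words "", h0, outerB words m hm hlen words.length le_rfl, List.map_map]
  rfl

-- ===== VERDICT (by name: the statement is the Claim_ definition above) =====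
theorem deinterleave_spec : Claim_equal_deinterleave := by
  intro words ppm _hdom hpre
  unfold Spec_deinterleave
  by_cases hm : 0 < ppm
  · have hppm : ppm = ((ppm.toNat : Nat) : Int) := by omega
    have hlen : ∀ w ∈ words, ppm.toNat ≤ w.toList.length := by
      intro w hw
      rcases hpre with h | h
      · omega
      · have := h w hw; omega
    rw [hppm, A_eq words ppm.toNat (by omega), B_eq words ppm.toNat (by omega) hlen]
  · rw [A_nil words ppm (by omega)]
    unfold deinterleave_alt
    rw [if_pos (by omega)]
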